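-- pv_equiv track=rewrite | github.com/wellsangels/tickerMatch | tickerMatch.py | distance_measure
-- ===== SOURCE A (Python) =====
-- def distance_measure(search_string, key_string, frequency_dic):
-- 	search_string_words = search_string.split()
-- 	key_string_words = key_string.split()
-- 	total_score = 0
-- 	for word in search_string_words:
-- 		if word in key_string_words:
-- 			if word in frequency_dic.keys():
-- 				total_score = frequency_dic[word]+total_score
-- 			else:
-- 				total_score = 1 + total_score
-- 		else:
-- 			if word in frequency_dic.keys():
-- 				total_score = total_score - frequency_dic[word]
-- 			else:
-- 				total_score = total_score - 1
-- 	# if total_score <= 0: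
-- 	# 	jaccard_score = distance.jaccard(search_string, key_string)
-- 	# 	if jaccard_score < 0.0001:
-- 	# 		total_score = 0.001
--
-- 	return total_score
-- ===== SOURCE B (Python) =====
-- def distance_measure(search_string, key_string, frequency_dic):
--     # Simpler decomposition: two aggregate sums combined by 2*matched - all
--     # (matched words contribute +w, unmatched -w).
--     words = search_string.split()
--     key_set = set(key_string.split())
--     sum_all = sum(frequency_dic.get(w, 1) for w in words)
--     sum_matched = sum(frequency_dic.get(w, 1) for w in words if w in key_set)
--     return 2 * sum_matched - sum_all
-- ===== Notes on version B (the rewrite author's own statement) =====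
-- stated objective: simpler
-- what changed: Replaced A's per-word four-way sign branching on a running accumulator by a key set plus two aggregate sums (over all words, and over matched words), combined with the linear identity 2*matched - all = matched - unmatched.
import Mathlib
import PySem

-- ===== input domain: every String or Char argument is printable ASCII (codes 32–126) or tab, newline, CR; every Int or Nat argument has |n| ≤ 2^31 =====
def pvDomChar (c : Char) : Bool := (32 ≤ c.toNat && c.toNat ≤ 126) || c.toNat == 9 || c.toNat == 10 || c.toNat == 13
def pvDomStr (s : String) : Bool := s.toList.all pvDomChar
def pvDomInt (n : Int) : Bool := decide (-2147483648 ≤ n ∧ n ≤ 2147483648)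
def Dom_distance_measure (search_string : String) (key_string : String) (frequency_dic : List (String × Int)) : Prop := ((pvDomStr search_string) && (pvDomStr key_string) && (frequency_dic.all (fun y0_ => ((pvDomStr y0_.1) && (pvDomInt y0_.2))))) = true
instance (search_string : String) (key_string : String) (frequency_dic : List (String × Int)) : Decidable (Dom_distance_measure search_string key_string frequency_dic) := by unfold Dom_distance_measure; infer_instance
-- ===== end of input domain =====

-- B replaces A's per-word sign branching by two aggregate sums combined via 2*matched - all (simpler decomposition, same result).

-- ===== PORT A =====
def distance_measure (search_string : String) (key_string : String) (frequency_dic : List (String × Int)) : Int :=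
  let search_string_words := PySem.Str.split₀ search_string
  let key_string_words := PySem.Str.split₀ key_string
  search_string_words.foldl (fun total_score word =>
    if key_string_words.contains word then
      if PySem.Dict.contains (PySem.Dict.mk frequency_dic) word then
        PySem.Dict.getD (PySem.Dict.mk frequency_dic) word 0 + total_score
      else
        1 + total_score
    else
      if PySem.Dict.contains (PySem.Dict.mk frequency_dic) word then
        total_score - PySem.Dict.getD (PySem.Dict.mk frequency_dic) word 0
      else
        total_score - 1) 0

-- ===== PORT B =====
def distance_measure_alt (search_string : String) (key_string : String) (frequency_dic : List (String × Int)) : Int :=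
  let words := PySem.Str.split₀ search_string
  let key_set : PySem.Set String := PySem.Set.ofList (PySem.Str.split₀ key_string)
  let sum_all := (words.map (fun w => PySem.Dict.getD (PySem.Dict.mk frequency_dic) w 1)).sum
  let sum_matched := ((words.filter (fun w => PySem.Set.contains key_set w)).map
      (fun w => PySem.Dict.getD (PySem.Dict.mk frequency_dic) w 1)).sum
  2 * sum_matched - sum_all

-- ===== PRECONDITION & SPEC =====
def Spec_distance_measure (search_string : String) (key_string : String) (frequency_dic : List (String × Int)) (out : Int) : Prop := out = distance_measure_alt search_string key_string frequency_dic
instance (search_string : String) (key_string : String) (frequency_dic : List (String × Int)) (out : Int) : Decidable (Spec_distance_measure search_string key_string frequency_dic out) := by unfold Spec_distance_measure; infer_instance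

-- ===== CLAIM (what is proved, stated in full; the proofs are below) =====
def Claim_equal_distance_measure : Prop := ∀ (search_string : String) (key_string : String) (frequency_dic : List (String × Int)), Dom_distance_measure search_string key_string frequency_dic → Spec_distance_measure search_string key_string frequency_dic (distance_measure search_string key_string frequency_dic)

-- ===== LEMMAS AND PROOFS =====

-- On A's branches: the step value, in terms of B's weight w ↦ getD d w 1.
theorem pv_step_weight (d : List (String × Int)) (w : String) :
    (if PySem.Dict.contains (PySem.Dict.mk d) w then PySem.Dict.getD (PySem.Dict.mk d) w 0 else 1) = PySem.Dict.getD (PySem.Dict.mk d) w 1 := by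
  simp only [PySem.Dict.contains_eq_isSome_get?, PySem.Dict.getD]
  cases PySem.Dict.get? (PySem.Dict.mk d) w <;> simp

-- Loop invariant: A's fold from accumulator acc equals acc + 2*matched - all.
theorem pv_fold_eq (kw : List String) (d : List (String × Int)) :
    ∀ (ws : List String) (acc : Int),
    ws.foldl (fun total_score word =>
      if kw.contains word then
        if PySem.Dict.contains (PySem.Dict.mk d) word then PySem.Dict.getD (PySem.Dict.mk d) word 0 + total_score
        else 1 + total_score
      else
        if PySem.Dict.contains (PySem.Dict.mk d) word then total_score - PySem.Dict.getD (PySem.Dict.mk d) word 0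
        else total_score - 1) acc
    = acc + 2 * ((ws.filter (fun w => PySem.Set.contains (PySem.Set.ofList kw) w)).map
          (fun w => PySem.Dict.getD (PySem.Dict.mk d) w 1)).sum
        - (ws.map (fun w => PySem.Dict.getD (PySem.Dict.mk d) w 1)).sum := by
  intro ws
  induction ws with
  | nil => intro acc; simp
  | cons w ws ih =>
    intro acc
    have hset : PySem.Set.contains (PySem.Set.ofList kw) w = kw.contains w := by
      simp [PySem.Set.contains, PySem.Set.mem_ofList]
    have hw := pv_step_weight d w
    simp only [List.foldl_cons, List.filter_cons, List.map_cons, List.sum_cons, ih, hset]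
    by_cases hk : kw.contains w = true
    · simp only [hk, if_pos]
      by_cases hd : PySem.Dict.contains (PySem.Dict.mk d) w = true
      · simp only [hd, if_pos] at *
        simp only [List.map_cons, List.sum_cons]
        omega
      · simp only [Bool.not_eq_true] at hd
        simp only [hd, Bool.false_eq_true, if_false] at *
        simp only [List.map_cons, List.sum_cons]
        omega
    · simp only [Bool.not_eq_true] at hk
      simp only [hk, Bool.false_eq_true, if_false]
      by_cases hd : PySem.Dict.contains (PySem.Dict.mk d) w = true
      · simp only [hd, if_pos] at *
        omega
      · simp only [Bool.not_eq_true] at hd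
        simp only [hd, Bool.false_eq_true, if_false] at *
        omega

-- ===== VERDICT (by name: the statement is the Claim_ definition above) =====
theorem distance_measure_spec : Claim_equal_distance_measure := by
  intro s k d _
  unfold Spec_distance_measure distance_measure distance_measure_alt
  simp only [pv_fold_eq]
  omega
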